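-- pv_equiv track=rewrite | github.com/natasha-labs/psy-bot-platform | tests/archetype/archetype_test.py | calculate_profile
-- ===== SOURCE A (Python) =====
-- from collections import Counter
--
-- CATEGORY_LABELS = {
--     "leader": "Лидерство",
--     "observer": "Наблюдение",
--     "supporter": "Поддержка",
--     "free": "Свобода",
-- }
--
-- def calculate_profile(answer_values):
--     counts = Counter(answer_values)
--
--     for key in CATEGORY_LABELS:
--         if key not in counts:
--             counts[key] = 0
--
--     total = sum(counts.values())
--
--     percentages = {}
--     for key in CATEGORY_LABELS:
--         percentages[key] = 0 if total == 0 else round(counts[key] / total * 100)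
--
--     sorted_profiles = sorted(
--         percentages.items(),
--         key=lambda item: item[1],
--         reverse=True,
--     )
--
--     main_type = sorted_profiles[0][0]
--     second_type = sorted_profiles[1][0]
--
--     return percentages, main_type, second_type
-- ===== SOURCE B (Python) =====
-- CATEGORY_LABELS = {
--     "leader": "Лидерство",
--     "observer": "Наблюдение",
--     "supporter": "Поддержка",
--     "free": "Свобода",
-- }
--
-- def calculate_profile(answer_values):
--     total = len(answer_values)
--     percentages = {}
--     for key in CATEGORY_LABELS:
--         percentages[key] = 0 if total == 0 else round(answer_values.count(key) / total * 100)
--     best_key, best_val = "", -1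
--     second_key, second_val = "", -1
--     for key, val in percentages.items():
--         if val > best_val:
--             second_key, second_val = best_key, best_val
--             best_key, best_val = key, val
--         elif val > second_val:
--             second_key, second_val = key, val
--     return percentages, best_key, second_key
-- ===== Notes on version B (the rewrite author's own statement) =====
-- stated objective: simpler
-- what changed: B drops the Counter, the missing-key fill loop, the sum of counter values and the full stable sort: it uses total = len(answer_values), counts each of the four category labels directly, and finds the top two categories with one linear scan over the percentages using strict '>' so ties keep the earlier (insertion-order) category, exactly like the stable descending sort.
import Mathlib
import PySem

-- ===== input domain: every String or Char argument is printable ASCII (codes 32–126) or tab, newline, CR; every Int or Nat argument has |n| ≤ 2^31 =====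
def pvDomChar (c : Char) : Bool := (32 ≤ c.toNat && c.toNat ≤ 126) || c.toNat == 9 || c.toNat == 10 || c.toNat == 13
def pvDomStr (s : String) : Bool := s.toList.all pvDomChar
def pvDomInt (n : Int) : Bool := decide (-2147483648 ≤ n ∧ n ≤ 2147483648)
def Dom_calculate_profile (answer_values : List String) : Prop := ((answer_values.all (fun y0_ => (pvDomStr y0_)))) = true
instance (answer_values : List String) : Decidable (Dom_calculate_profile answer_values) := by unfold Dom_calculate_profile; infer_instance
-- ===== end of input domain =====

-- B replaces A's Counter + missing-key fill + sum-of-counts + full sort by: total = len(answer_values),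
-- a per-label count, and one linear top-2 scan (objective: simpler decomposition; same asymptotic cost).

-- ===== PORT A =====
-- shared helper: exact integer model of CPython's round(c/t*100) for 0 ≤ c ≤ t (binary64 semantics:
-- correctly round c/t to 53 bits, multiply by 100 and round to 53 bits, then round-half-even to an
-- integer); both Pythons evaluate exactly the expression round(count/total*100).
def pvNE (a b : Nat) : Nat :=
  let f := a / b
  let r := a % b
  if 2 * r < b then f else if b < 2 * r then f + 1 else if f % 2 = 0 then f else f + 1

def pvRound100 (c t : Int) : Int :=
  let cn := c.toNat
  let tn := t.toNat
  if cn = 0 then 0 else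
    let d1 := PySem.Int.bitLength (tn : Int) - PySem.Int.bitLength (cn : Int)
    let d := if tn ≤ cn * 2 ^ d1 then d1 else d1 + 1
    let p := 52 + d
    let m := pvNE (cn * 2 ^ p) tn
    let n2 := m * 100
    let q := 53 + p - PySem.Int.bitLength (n2 : Int)
    ((pvNE (pvNE (n2 * 2 ^ q) (2 ^ p)) (2 ^ q) : Nat) : Int)

def CATEGORY_LABELS : PySem.Dict String String :=
  PySem.Dict.ofList [("leader", "Лидерство"), ("observer", "Наблюдение"),
                     ("supporter", "Поддержка"), ("free", "Свобода")]

def calculate_profile (answer_values : List String) : (List (String × Int)) × String × String :=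
  let counts : PySem.Dict String Int := PySem.Dict.counter answer_values
  let counts := CATEGORY_LABELS.keys.foldl
    (fun d k => if d.contains k then d else d.insert k 0) counts
  let total : Int := counts.values.sum
  let percentages : PySem.Dict String Int := CATEGORY_LABELS.keys.foldl
    (fun p k => p.insert k (if total = 0 then 0 else pvRound100 (counts.getD k 0) total))
    PySem.Dict.empty
  let sorted_profiles := PySem.List.sorted percentages.items (fun item => item.2) true
  -- sorted_profiles always has 4 elements, so Python's [0]/[1] never raise; none-branches are unreachable
  let main_type := match PySem.List.pyGet? sorted_profiles 0 with | some x => x.1 | none => ""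
  let second_type := match PySem.List.pyGet? sorted_profiles 1 with | some x => x.1 | none => ""
  (percentages.items, main_type, second_type)

-- ===== PORT B =====
def calculate_profile_alt (answer_values : List String) : (List (String × Int)) × String × String :=
  let total : Int := (answer_values.length : Int)
  let percentages : PySem.Dict String Int := CATEGORY_LABELS.keys.foldl
    (fun p k => p.insert k (if total = 0 then 0 else pvRound100 (PySem.List.count answer_values k) total))
    PySem.Dict.empty
  let fin := percentages.items.foldl
    (fun (st : (String × Int) × String × Int) kv =>
      if st.1.2 < kv.2 then ((kv.1, kv.2), st.1)
      else if st.2.2 < kv.2 then (st.1, (kv.1, kv.2))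
      else st)
    (("", -1), ("", -1))
  (percentages.items, fin.1.1, fin.2.1)

-- ===== PRECONDITION & SPEC =====
def Spec_calculate_profile (answer_values : List String) (out : (List (String × Int)) × String × String) : Prop := out = calculate_profile_alt answer_values
instance (answer_values : List String) (out : (List (String × Int)) × String × String) : Decidable (Spec_calculate_profile answer_values out) := by unfold Spec_calculate_profile; infer_instance

-- ===== CLAIM (what is proved, stated in full; the proofs are below) =====
def Claim_equal_calculate_profile : Prop := ∀ (answer_values : List String), Dom_calculate_profile answer_values → Spec_calculate_profile answer_values (calculate_profile answer_values)

-- ===== LEMMAS AND PROOFS =====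

-- B's scan step, as the literal lambda of the port of B (used only by the proofs)
def pvStep (st : (String × Int) × String × Int) (kv : String × Int) : (String × Int) × String × Int :=
  if st.1.2 < kv.2 then ((kv.1, kv.2), st.1)
  else if st.2.2 < kv.2 then (st.1, (kv.1, kv.2))
  else st

-- one step of A's missing-key fill never changes a getD-with-default-0 …
lemma fill_getD_step (d : PySem.Dict String Int) (k' k : String) :
    (if d.contains k' then d else d.insert k' 0).getD k 0 = d.getD k 0 := by
  by_cases h : d.contains k'
  · simp [h]
  · simp only [h, Bool.false_eq_true, ↓reduceIte]
    rw [PySem.Dict.getD_insert]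
    split_ifs with hk
    · subst hk; rw [PySem.Dict.getD_of_not_contains d 0 (by simpa using h)]
    · rfl

-- … nor the sum of the stored values
lemma fill_sum_step (d : PySem.Dict String Int) (k' : String) :
    (if d.contains k' then d else d.insert k' 0).values.sum = d.values.sum := by
  by_cases h : d.contains k'
  · simp [h]
  · simp only [h, Bool.false_eq_true, ↓reduceIte]
    simp [PySem.Dict.values, PySem.Dict.items_insert_of_not_contains d 0 (by simpa using h)]

-- the values of Counter(xs) sum to len(xs)
lemma counter_values_sum (xs : List String) :
    (PySem.Dict.counter xs).values.sum = (xs.length : Int) := by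
  rw [PySem.Dict.values_eq_map_keys _ (PySem.Dict.nodup_keys_counter xs) 0]
  rw [PySem.Dict.keys_counter]
  have hperm : (PySem.Set.ofList xs : List String).Perm xs.dedup := by
    rw [List.perm_ext_iff_of_nodup (PySem.Set.nodup_ofList xs) xs.nodup_dedup]
    intro a; simp [PySem.Set.mem_ofList, List.mem_dedup]
  calc (List.map (fun k => (PySem.Dict.counter xs).getD k 0) (PySem.Set.ofList xs)).sum
      = (List.map (fun k => ((List.count k xs : Int))) (PySem.Set.ofList xs)).sum := by
        simp [PySem.Dict.getD_counter]
    _ = (List.map (fun k => ((List.count k xs : Int))) xs.dedup).sum := (hperm.map _).sum_eq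
    _ = ((List.map (fun k => List.count k xs) xs.dedup).sum : Int) := by
        push_cast; rw [List.map_map]; rfl
    _ = (xs.length : Int) := by rw [List.sum_map_count_dedup_eq_length]

lemma pvRound100_nonneg (c t : Int) : 0 ≤ pvRound100 c t := by
  unfold pvRound100; dsimp only; split_ifs <;> simp

-- inserting into a list with at least two elements: the first two elements afterwards are
-- exactly one step of B's top-2 scan
lemma ib2 (x p q : String × Int) (t : List (String × Int)) :
    ∃ l', PySem.List.insertBy (fun a b => decide (b.2 < a.2)) x (p :: q :: t) =
      (pvStep (p, q) x).1 :: (pvStep (p, q) x).2 :: l' := by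
  simp only [PySem.List.insertBy, decide_eq_true_eq, pvStep]
  split_ifs with h1 h2 <;> exact ⟨_, rfl⟩

-- the whole insertion-sort fold from a two-element start: first two elements = B's scan
lemma scan_foldl (xs : List (String × Int)) : ∀ (p q : String × Int) (l : List (String × Int)),
    ∃ l', xs.foldl (fun acc x => PySem.List.insertBy (fun a b => decide (b.2 < a.2)) x acc) (p :: q :: l)
      = (xs.foldl pvStep (p, q)).1 :: (xs.foldl pvStep (p, q)).2 :: l' := by
  induction xs with
  | nil => exact fun p q l => ⟨l, rfl⟩
  | cons a t ih =>
    intro p q l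
    simp only [List.foldl_cons]
    obtain ⟨l'', hl⟩ := ib2 a p q l
    rw [hl]
    rcases hst : pvStep (p, q) a with ⟨r, s⟩
    exact ih r s l''

-- an element with a nonnegative value is always inserted before the two (-1)-sentinels
lemma insertBy_sent (x : String × Int) (hx : 0 ≤ x.2) : ∀ l : List (String × Int),
    PySem.List.insertBy (fun a b => decide (b.2 < a.2)) x (l ++ [("", -1), ("", -1)]) =
      PySem.List.insertBy (fun a b => decide (b.2 < a.2)) x l ++ [("", -1), ("", -1)] := by
  intro l
  induction l with
  | nil => simp [PySem.List.insertBy, show (-1 : Int) < x.2 by omega]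
  | cons a l ih =>
    simp only [List.cons_append, PySem.List.insertBy]
    split_ifs with h
    · rfl
    · rw [ih]; rfl

lemma foldl_sent (xs : List (String × Int)) (h : ∀ x ∈ xs, 0 ≤ x.2) :
    ∀ l : List (String × Int),
    xs.foldl (fun acc x => PySem.List.insertBy (fun a b => decide (b.2 < a.2)) x acc) (l ++ [("", -1), ("", -1)])
      = xs.foldl (fun acc x => PySem.List.insertBy (fun a b => decide (b.2 < a.2)) x acc) l ++ [("", -1), ("", -1)] := by
  induction xs with
  | nil => intro l; rfl
  | cons a t ih =>
    intro l
    simp only [List.foldl_cons]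
    rw [insertBy_sent a (h a (by simp)) l]
    exact ih (fun x hx => h x (by simp [hx])) _

-- the first two keys of the stable descending sort are B's linear top-2 scan
lemma main_second (items : List (String × Int)) (hv : ∀ x ∈ items, 0 ≤ x.2)
    (hlen : 2 ≤ items.length) :
    (((match PySem.List.pyGet? (PySem.List.sorted items (fun it => it.2) true) 0 with
        | some x => x.1 | none => ""),
       (match PySem.List.pyGet? (PySem.List.sorted items (fun it => it.2) true) 1 with
        | some x => x.1 | none => "")) : String × String)
      = ((items.foldl pvStep (("", -1), ("", -1))).1.1,
         (items.foldl pvStep (("", -1), ("", -1))).2.1) := by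
  have hlen2 : 2 ≤ (PySem.List.sorted items (fun it => it.2) true).length := by
    rw [PySem.List.length_sorted]; exact hlen
  rcases hs : PySem.List.sorted items (fun it => it.2) true with _ | ⟨a, _ | ⟨b, rest⟩⟩
  · rw [hs] at hlen2; simp at hlen2
  · rw [hs] at hlen2; simp at hlen2
  · rw [PySem.List.sorted_rev_eq_foldl_insertBy] at hs
    have h1 := foldl_sent items hv []
    simp only [List.nil_append] at h1
    obtain ⟨l', h2⟩ := scan_foldl items ("", -1) ("", -1) []
    rw [h1, hs] at h2
    simp only [List.cons_append, List.cons.injEq] at h2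
    obtain ⟨ha, hb, -⟩ := h2
    have hp : (0:Int) ≤ (rest.length : Int) + 1 := by positivity
    simp [PySem.List.pyGet?, PySem.List.pyIdx?, ha, hb, hp]

-- ===== VERDICT (by name: the statement is the Claim_ definition above) =====
theorem calculate_profile_spec : Claim_equal_calculate_profile := by
  intro xs _
  show calculate_profile xs = calculate_profile_alt xs
  have hkeys : CATEGORY_LABELS.keys = ["leader", "observer", "supporter", "free"] := rfl
  simp only [calculate_profile, calculate_profile_alt, hkeys, List.foldl_cons, List.foldl_nil,
    fill_getD_step, fill_sum_step, counter_values_sum, PySem.Dict.getD_counter,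
    PySem.List.count_eq]
  congr 1
  refine main_second _ ?_ ?_
  · intro x hx
    have hw : ∀ c : Int, 0 ≤ (if ((xs.length : Int)) = 0 then 0 else pvRound100 c (xs.length : Int)) := by
      intro c; split_ifs
      · omega
      · exact pvRound100_nonneg _ _
    simp only [PySem.Dict.mem_items_insert,
      show (PySem.Dict.empty : PySem.Dict String Int).items = [] from rfl,
      List.not_mem_nil, false_and, or_false] at hx
    rcases hx with h | ⟨h | ⟨h | ⟨h, -⟩, -⟩, -⟩
    · rw [h]; exact hw _
    · rw [h]; exact hw _
    · rw [h]; exact hw _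
    · rw [h]; exact hw _
  · simp [PySem.Dict.items_insert, PySem.Dict.contains_insert, PySem.Dict.contains_empty,
      show (PySem.Dict.empty : PySem.Dict String Int).items = [] from rfl]
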